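-- pv_equiv track=rewrite | github.com/kqsavell/cs4341Gomoku | main.py | get_horizontal_heuristic
-- ===== SOURCE A (Python) =====
-- def get_horizontal_heuristic(board, value):
--     heuristic_value = 0
--     for row in board:
--         for start in range(0, len(row)- 5):
--             friendly_count = 0
--             enemy_count = 0
--             for i in range(5):
--                 if row[start + i] == value:
--                     friendly_count += 1
--                 else:
--                     enemy_count += 1
--             if friendly_count > enemy_count:
--                 heuristic_value += 1
--             else:
--                 heuristic_value -= 1
--     return heuristic_value
-- ===== SOURCE B (Python) =====
-- def get_horizontal_heuristic(board, value):
--     total = 0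
--     for row in board:
--         # prefix sums: pre[k] = number of cells equal to value in row[:k]
--         pre = [0]
--         running = 0
--         for cell in row:
--             running += (cell == value)
--             pre.append(running)
--         for start in range(0, len(row) - 5):
--             friendly = pre[start + 5] - pre[start]
--             total += 1 if friendly >= 3 else -1
--     return total
-- ===== Notes on version B (the rewrite author's own statement) =====
-- stated objective: faster
-- what changed: B builds a per-row prefix-sum table of matches once and computes each window's friendly count as a difference of two table entries (threshold >=3), instead of A's inner loop re-counting the 5 cells and both counters for every window.
import Mathlib
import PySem

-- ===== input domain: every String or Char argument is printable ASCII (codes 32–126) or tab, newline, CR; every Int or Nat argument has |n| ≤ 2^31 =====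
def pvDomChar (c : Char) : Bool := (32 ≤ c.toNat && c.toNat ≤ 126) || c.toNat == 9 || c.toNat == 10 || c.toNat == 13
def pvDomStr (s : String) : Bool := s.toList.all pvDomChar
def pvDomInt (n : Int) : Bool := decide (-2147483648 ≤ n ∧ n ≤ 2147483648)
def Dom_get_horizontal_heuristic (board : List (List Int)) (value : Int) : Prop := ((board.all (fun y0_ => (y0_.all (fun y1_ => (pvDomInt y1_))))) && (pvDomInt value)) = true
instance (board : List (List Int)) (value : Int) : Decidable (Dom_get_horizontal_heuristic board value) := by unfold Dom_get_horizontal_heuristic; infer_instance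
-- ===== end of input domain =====

-- B replaces the per-window 5-cell recount by a prefix-sum table per row (alternative decomposition, same asymptotic cost).

-- ===== PORT A =====
-- literal transliteration of A: nested loops; row[start+i] is always in range, ported as pyGetD
def get_horizontal_heuristic (board : List (List Int)) (value : Int) : Int :=
  board.foldl (fun hv row =>
    (PySem.List.pyRange 0 ((row.length : Int) - 5) 1).foldl (fun hv start =>
      let fe := (PySem.List.pyRange 0 5 1).foldl (fun (fe : Int × Int) i =>
        if PySem.List.pyGetD row (start + i) 0 = value then (fe.1 + 1, fe.2)
        else (fe.1, fe.2 + 1)) (0, 0)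
      if fe.1 > fe.2 then hv + 1 else hv - 1) hv) 0

-- ===== PORT B =====
-- literal transliteration of Source B: build prefix sums (pre, running), then one windowed pass
def get_horizontal_heuristic_alt (board : List (List Int)) (value : Int) : Int :=
  board.foldl (fun total row =>
    let pr := row.foldl (fun (st : List Int × Int) cell =>
      let running := st.2 + (if cell = value then 1 else 0)  -- Python bool arithmetic: running += (cell == value)
      (st.1 ++ [running], running)) ([0], 0)
    (PySem.List.pyRange 0 ((row.length : Int) - 5) 1).foldl (fun total start =>
      let friendly := PySem.List.pyGetD pr.1 (start + 5) 0 - PySem.List.pyGetD pr.1 start 0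
      total + (if friendly ≥ 3 then 1 else -1)) total) 0

-- ===== PRECONDITION & SPEC =====
def Spec_get_horizontal_heuristic (board : List (List Int)) (value : Int) (out : Int) : Prop := out = get_horizontal_heuristic_alt board value
instance (board : List (List Int)) (value : Int) (out : Int) : Decidable (Spec_get_horizontal_heuristic board value out) := by unfold Spec_get_horizontal_heuristic; infer_instance

-- ===== CLAIM (what is proved, stated in full; the proofs are below) =====
def Claim_equal_get_horizontal_heuristic : Prop := ∀ (board : List (List Int)) (value : Int), Dom_get_horizontal_heuristic board value → Spec_get_horizontal_heuristic board value (get_horizontal_heuristic board value)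

-- ===== LEMMAS AND PROOFS =====

def pvPre (row : List Int) (value : Int) : List Int :=
  (List.range (row.length + 1)).map (fun k => ((row.take k).countP (fun x => x == value) : Int))

def pvCnt (row : List Int) (value : Int) : Int := ((row.countP (fun x => x == value)) : Int)

lemma pvCnt_snoc (done : List Int) (c value : Int) :
    pvCnt (done ++ [c]) value = pvCnt done value + (if c = value then 1 else 0) := by
  simp [pvCnt, List.countP_append, List.countP_cons]

lemma pvPre_snoc (done : List Int) (c value : Int) :
    pvPre (done ++ [c]) value = pvPre done value ++ [pvCnt done value + (if c = value then 1 else 0)] := by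
  simp only [pvPre, List.length_append, List.length_singleton]
  rw [show done.length + 1 + 1 = (done.length + 1) + 1 from rfl, List.range_succ, List.map_append]
  congr 1
  · apply List.map_congr_left
    intro k hk
    rw [List.mem_range] at hk
    rw [List.take_append_of_le_length (by omega)]
  · simp [List.take_of_length_le, List.countP_append, List.countP_cons, pvCnt]

lemma build_go (value : Int) : ∀ (rest done : List Int),
    rest.foldl (fun (st : List Int × Int) cell =>
      let running := st.2 + (if cell = value then 1 else 0)
      (st.1 ++ [running], running)) (pvPre done value, pvCnt done value)
    = (pvPre (done ++ rest) value, pvCnt (done ++ rest) value) := by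
  intro rest
  induction rest with
  | nil => intro done; simp
  | cons c cs ih =>
    intro done
    simp only [List.foldl_cons]
    rw [show ((pvPre done value, pvCnt done value).1 ++ [(pvPre done value, pvCnt done value).2 + (if c = value then 1 else 0)],
        (pvPre done value, pvCnt done value).2 + (if c = value then 1 else 0))
        = (pvPre (done ++ [c]) value, pvCnt (done ++ [c]) value) from by
      rw [pvPre_snoc, pvCnt_snoc]]
    rw [ih (done ++ [c])]
    simp

lemma build (row : List Int) (value : Int) :
    row.foldl (fun (st : List Int × Int) cell =>
      let running := st.2 + (if cell = value then 1 else 0)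
      (st.1 ++ [running], running)) ([0], 0)
    = (pvPre row value, pvCnt row value) := by
  have h0 : pvPre [] value = [0] := by simp [pvPre]
  have h1 : pvCnt [] value = 0 := by simp [pvCnt]
  have := build_go value row []
  rw [h0, h1] at this
  simpa using this

def pvInd (row : List Int) (value : Int) (j : Nat) : Int := if row.getD j 0 = value then 1 else 0

def pvW (row : List Int) (value : Int) (s : Nat) : Int :=
  pvInd row value s + pvInd row value (s+1) + pvInd row value (s+2) + pvInd row value (s+3) + pvInd row value (s+4)

-- A's inner 5-cell counting loop
lemma innerA (row : List Int) (value : Int) (s : Nat) :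
    (PySem.List.pyRange 0 5 1).foldl (fun (fe : Int × Int) i =>
      if PySem.List.pyGetD row ((s : Int) + i) 0 = value then (fe.1 + 1, fe.2)
      else (fe.1, fe.2 + 1)) (0, 0)
    = (pvW row value s, 5 - pvW row value s) := by
  have hr : PySem.List.pyRange 0 5 1 = [0, 1, 2, 3, 4] := by decide
  rw [hr]
  simp only [List.foldl_cons, List.foldl_nil]
  have c0 : (s : Int) + 0 = ((s : Int)) := by ring
  have c1 : (s : Int) + 1 = ((s + 1 : Nat) : Int) := by push_cast; ring
  have c2 : (s : Int) + 2 = ((s + 2 : Nat) : Int) := by push_cast; ring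
  have c3 : (s : Int) + 3 = ((s + 3 : Nat) : Int) := by push_cast; ring
  have c4 : (s : Int) + 4 = ((s + 4 : Nat) : Int) := by push_cast; ring
  rw [c0, c1, c2, c3, c4]
  simp only [PySem.List.pyGetD_natCast, pvW, pvInd]
  split_ifs <;> simp

-- prefix-sum lookup
lemma pre_get (row : List Int) (value : Int) (s : Nat) (h : s ≤ row.length) :
    PySem.List.pyGetD (pvPre row value) (s : Int) 0 = ((row.take s).countP (fun x => x == value) : Int) := by
  rw [PySem.List.pyGetD_natCast]
  simp only [pvPre, List.getD_eq_getElem?_getD, List.getElem?_map]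
  rw [List.getElem?_range (by omega : s < row.length + 1)]
  simp

lemma cnt_take_succ (row : List Int) (value : Int) (n : Nat) (h : n < row.length) :
    ((row.take (n+1)).countP (fun x => x == value) : Int)
    = ((row.take n).countP (fun x => x == value) : Int) + pvInd row value n := by
  have hg : row[n]? = some row[n] := List.getElem?_eq_getElem h
  rw [List.take_add_one, hg]
  simp only [Option.toList_some, List.countP_append, List.countP_cons, List.countP_nil]
  unfold pvInd
  rw [List.getD_eq_getElem _ _ h]
  split_ifs <;> simp_all

lemma window (row : List Int) (value : Int) (s : Nat) (h : s + 5 ≤ row.length) :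
    ((row.take (s+5)).countP (fun x => x == value) : Int)
    - ((row.take s).countP (fun x => x == value) : Int) = pvW row value s := by
  rw [show s+5 = (s+4)+1 from rfl, cnt_take_succ row value (s+4) (by omega)]
  rw [show s+4 = (s+3)+1 from rfl, cnt_take_succ row value (s+3) (by omega)]
  rw [show s+3 = (s+2)+1 from rfl, cnt_take_succ row value (s+2) (by omega)]
  rw [show s+2 = (s+1)+1 from rfl, cnt_take_succ row value (s+1) (by omega)]
  rw [cnt_take_succ row value s (by omega)]
  simp [pvW]; ring

lemma rowEq (row : List Int) (value : Int) (acc : Int) :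
    (PySem.List.pyRange 0 ((row.length : Int) - 5) 1).foldl (fun hv start =>
      let fe := (PySem.List.pyRange 0 5 1).foldl (fun (fe : Int × Int) i =>
        if PySem.List.pyGetD row (start + i) 0 = value then (fe.1 + 1, fe.2)
        else (fe.1, fe.2 + 1)) (0, 0)
      if fe.1 > fe.2 then hv + 1 else hv - 1) acc
    = (let pr := row.foldl (fun (st : List Int × Int) cell =>
        let running := st.2 + (if cell = value then 1 else 0)
        (st.1 ++ [running], running)) ([0], 0)
      (PySem.List.pyRange 0 ((row.length : Int) - 5) 1).foldl (fun total start =>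
        let friendly := PySem.List.pyGetD pr.1 (start + 5) 0 - PySem.List.pyGetD pr.1 start 0
        total + (if friendly ≥ 3 then 1 else -1)) acc) := by
  simp only [build]
  apply PySem.List.foldl_congr_mem
  intro a start hmem
  rw [PySem.List.mem_pyRange_one] at hmem
  obtain ⟨h0, h1⟩ := hmem
  have hs : start = ((start.toNat : Nat) : Int) := (Int.toNat_of_nonneg h0).symm
  set s := start.toNat with hsdef
  have hle : s + 5 ≤ row.length := by omega
  rw [hs]
  simp only [innerA]
  have h5 : ((s : Nat) : Int) + 5 = (((s + 5 : Nat)) : Int) := by push_cast; ring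
  rw [h5, pre_get row value (s+5) (by omega), pre_get row value s (by omega)]
  rw [window row value s hle]
  split_ifs <;> omega

-- ===== VERDICT (by name: the statement is the Claim_ definition above) =====
theorem get_horizontal_heuristic_spec : Claim_equal_get_horizontal_heuristic := by
  intro board value _
  unfold Spec_get_horizontal_heuristic get_horizontal_heuristic get_horizontal_heuristic_alt
  have hstep : (fun (hv : Int) (row : List Int) =>
      (PySem.List.pyRange 0 ((row.length : Int) - 5) 1).foldl (fun hv start =>
        let fe := (PySem.List.pyRange 0 5 1).foldl (fun (fe : Int × Int) i =>
          if PySem.List.pyGetD row (start + i) 0 = value then (fe.1 + 1, fe.2)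
          else (fe.1, fe.2 + 1)) (0, 0)
        if fe.1 > fe.2 then hv + 1 else hv - 1) hv)
      = (fun (total : Int) (row : List Int) =>
      let pr := row.foldl (fun (st : List Int × Int) cell =>
        let running := st.2 + (if cell = value then 1 else 0)
        (st.1 ++ [running], running)) ([0], 0)
      (PySem.List.pyRange 0 ((row.length : Int) - 5) 1).foldl (fun total start =>
        let friendly := PySem.List.pyGetD pr.1 (start + 5) 0 - PySem.List.pyGetD pr.1 start 0
        total + (if friendly ≥ 3 then 1 else -1)) total) := by
    funext acc row
    exact rowEq row value acc
  rw [hstep]
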